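-- pv_equiv track=rewrite | github.com/pal-robotics/tiago_moveit_config | config/srdf/urdf_to_disable_collisions.py | traverse_from
-- ===== SOURCE A (Python) =====
-- def traverse_from(from_link, child_map, level=0):
--     """Traverse tree from link 'from_link' until end
--     forming the disable collision lines"""
--     next_childs = child_map[from_link]
--     dcl = ""
--     for joint, link in next_childs:
--         # print "  " * level + str(link)
--         if link in child_map:
--             dcl += dcl_between(from_link, link)
--             dcl += traverse_from(link, child_map, level=level + 1)
--             # print "From " + from_link + " to " + link
--         else:
--             # print "No more childs..."
--             # print "From " + from_link + " to " + link
--             dcl += dcl_between(from_link, link)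
--     return dcl
--
-- def dcl_between(link1, link2, reason="Adjacent"):
--     link1, link2 = sorted((str(link1), str(link2)))
--     """Create the disable collision line string between link1 and link2"""
--     dcl = '  <disable_collisions link1="' + link1 + \
--           '" link2="' + link2 + '" reason="' + reason + '" />\n'
--     return dcl
-- ===== SOURCE B (Python) =====
-- def traverse_from(from_link, child_map, level=0):
--     """Iterative re-implementation: explicit stack of (parent, link) edges,
--     preorder (children pushed in reverse), lines collected and joined once."""
--     lines = []
--     stack = [(from_link, link) for _, link in reversed(child_map[from_link])]
--     while stack:
--         parent, link = stack.pop()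
--         lines.append(dcl_between(parent, link))
--         if link in child_map:
--             stack.extend((link, l) for _, l in reversed(child_map[link]))
--     return ''.join(lines)
--
--
-- def dcl_between(link1, link2, reason="Adjacent"):
--     link1, link2 = sorted((str(link1), str(link2)))
--     dcl = '  <disable_collisions link1="' + link1 + \
--           '" link2="' + link2 + '" reason="' + reason + '" />\n'
--     return dcl
-- ===== Notes on version B (the rewrite author's own statement) =====
-- stated objective: alternative
-- what changed: The recursive tree traversal accumulating into a string with += is replaced by an iterative explicit-stack preorder walk over (parent, link) edge work-items (children pushed in reverse) that collects the lines in a list and joins them once.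
import Mathlib
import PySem

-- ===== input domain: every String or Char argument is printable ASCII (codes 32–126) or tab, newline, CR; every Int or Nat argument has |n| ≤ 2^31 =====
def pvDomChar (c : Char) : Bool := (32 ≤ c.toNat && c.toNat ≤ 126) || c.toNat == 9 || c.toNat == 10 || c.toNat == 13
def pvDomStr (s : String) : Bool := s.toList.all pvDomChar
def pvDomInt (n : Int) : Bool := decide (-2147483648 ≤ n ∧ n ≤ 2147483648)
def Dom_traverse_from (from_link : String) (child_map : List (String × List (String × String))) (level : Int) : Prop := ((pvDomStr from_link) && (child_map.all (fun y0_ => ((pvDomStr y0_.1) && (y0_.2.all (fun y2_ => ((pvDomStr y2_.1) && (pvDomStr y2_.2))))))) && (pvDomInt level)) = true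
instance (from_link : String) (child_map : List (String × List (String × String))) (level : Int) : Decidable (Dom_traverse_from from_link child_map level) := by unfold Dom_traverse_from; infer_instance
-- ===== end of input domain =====

-- B rewrites A's recursive traversal as an iterative explicit-stack preorder walk collecting lines in a
-- list joined once; equivalence of the RETURN value is proved on Pre_ (root present, no reachable key-cycle).

-- ===== PORT A =====

-- dict lookup child_map[k]: first match (shared module helper domain: assoc list)
def pvGet? (cm : List (String × List (String × String))) (k : String) : Option (List (String × String)) :=
  match cm with
  | [] => none
  | (k', v) :: rest => if k' == k then some v else pvGet? rest k

-- dcl_between: sorted((link1, link2)) of two strings = the ≤-ordered pair (exact: Python's string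
-- comparison is code-point lexicographic, as is Lean's String ≤ on this ASCII domain)
def dcl_between (link1 link2 : String) : String :=
  let l1 := if link1 ≤ link2 then link1 else link2
  let l2 := if link1 ≤ link2 then link2 else link1
  "  <disable_collisions link1=\"" ++ l1 ++ "\" link2=\"" ++ l2 ++ "\" reason=\"Adjacent\" />\n"

-- A's recursion, with a fuel counter as totality guard only (under Pre_ the recursion depth is
-- ≤ child_map.length + 1, so fuel child_map.length + 2 is never exhausted)
mutual
def traverse_fromFuel : Nat → String → List (String × List (String × String)) → String
  | 0, _, _ => ""                                   -- fuel exhausted: unreachable under Pre_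
  | d + 1, from_link, cm =>
    match pvGet? cm from_link with
    | none => ""                                    -- KeyError: excluded by Pre_
    | some next_childs => traverseLoopA d from_link cm next_childs ""
  termination_by d _ _ => (d, 0)

-- the for-loop of A, accumulator dcl
def traverseLoopA : Nat → String → List (String × List (String × String)) → List (String × String) → String → String
  | _, _, _, [], dcl => dcl
  | d, fl, cm, (_, link) :: rest, dcl =>
    if (pvGet? cm link).isSome then
      traverseLoopA d fl cm rest (dcl ++ dcl_between fl link ++ traverse_fromFuel d link cm)
    else
      traverseLoopA d fl cm rest (dcl ++ dcl_between fl link)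
  termination_by d _ _ l _ => (d, l.length + 1)
end

def traverse_from (from_link : String) (child_map : List (String × List (String × String))) (level : Int) : String :=
  traverse_fromFuel (child_map.length + 2) from_link child_map

-- ===== PORT B =====

-- number of lines the traversal from l emits (depth-fueled); used only to pre-compute loop fuel
def pvCost : Nat → String → List (String × List (String × String)) → Nat
  | 0, _, _ => 0
  | d + 1, l, cm =>
    match pvGet? cm l with
    | none => 0
    | some ch => ch.foldl (fun a jl => a + 1 + pvCost d jl.2 cm) 0

-- the while-loop of B: stack head = top; pop one (parent, link) edge, emit its line, push children
def traverseStack : Nat → List (String × List (String × String)) → List (String × String) → List String → List String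
  | _, _, [], lines => lines
  | 0, _, _, lines => lines                          -- fuel exhausted: unreachable under Pre_
  | f + 1, cm, (parent, link) :: rest, lines =>
    match pvGet? cm link with
    | some ch => traverseStack f cm (ch.map (fun jl => (link, jl.2)) ++ rest) (lines ++ [dcl_between parent link])
    | none => traverseStack f cm rest (lines ++ [dcl_between parent link])

def traverse_from_alt (from_link : String) (child_map : List (String × List (String × String))) (level : Int) : String :=
  match pvGet? child_map from_link with
  | none => ""                                       -- KeyError, like A: excluded by Pre_
  | some ch =>
    String.join (traverseStack (pvCost (child_map.length + 2) from_link child_map) child_map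
      (ch.map (fun jl => (from_link, jl.2))) [])

-- ===== PRECONDITION & SPEC =====

-- Graph-shape property of the input: no child-chain of keys starting at l revisits a key.  This is
-- the standard path-marking cycle test on the input graph (it computes none of the ports' output and
-- shares no code with them); an equivalent quantifier form ("no chain of length > #keys from l")
-- has no feasibly decidable closed form.  The depth bound child_map.length + 2 can only be reached
-- after a key repeats on the path, so the test decides exactly this property.
def pvNoCycle : Nat → List (String × List (String × String)) → List String → String → Bool
  | 0, _, _, _ => false
  | d + 1, cm, path, l =>
    match cm.lookup l with
    | none => true
    | some ch => !path.contains l && ch.all (fun jl => pvNoCycle d cm (l :: path) jl.2)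

-- Pre_ excludes exactly the inputs on which Python A raises: from_link missing from child_map
-- (KeyError, in both A and B) and a key-cycle reachable from from_link (A: RecursionError; B loops).
def Pre_traverse_from (from_link : String) (child_map : List (String × List (String × String))) (level : Int) : Prop :=
  from_link ∈ child_map.map Prod.fst ∧
  pvNoCycle (child_map.length + 2) child_map [] from_link = true
instance (from_link : String) (child_map : List (String × List (String × String))) (level : Int) : Decidable (Pre_traverse_from from_link child_map level) := by unfold Pre_traverse_from; infer_instance

def pvWitness_traverse_from : String × (List (String × List (String × String))) × Int :=
  ("base", [("base", [("j1", "arm"), ("j2", "wheel")]), ("arm", [("j3", "hand")])], 0)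

def Spec_traverse_from (from_link : String) (child_map : List (String × List (String × String))) (level : Int) (out : String) : Prop := out = traverse_from_alt from_link child_map level
instance (from_link : String) (child_map : List (String × List (String × String))) (level : Int) (out : String) : Decidable (Spec_traverse_from from_link child_map level out) := by unfold Spec_traverse_from; infer_instance

-- ===== CLAIM (what is proved, stated in full; the proofs are below) =====
def Claim_equal_traverse_from : Prop := ∀ (from_link : String) (child_map : List (String × List (String × String))) (level : Int), Dom_traverse_from from_link child_map level → Pre_traverse_from from_link child_map level → Spec_traverse_from from_link child_map level (traverse_from from_link child_map level)

-- ===== LEMMAS AND PROOFS =====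

-- "the traversal from l completes strictly within depth d" (proof-side bookkeeping)
def pvDone : Nat → String → List (String × List (String × String)) → Bool
  | 0, _, _ => false
  | d + 1, l, cm =>
    match pvGet? cm l with
    | none => true
    | some ch => ch.all (fun jl => pvDone d jl.2 cm)

-- the lines A's traversal from l produces, as a list
def pvLines : Nat → String → List (String × List (String × String)) → List String
  | 0, _, _ => []
  | d + 1, l, cm =>
    match pvGet? cm l with
    | none => []
    | some ch => ch.flatMap (fun jl => dcl_between l jl.2 :: pvLines d jl.2 cm)

theorem pvFoldl_str (xs : List String) (s : String) :
    xs.foldl (fun r t => r ++ t) s = s ++ xs.foldl (fun r t => r ++ t) "" := by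
  induction xs generalizing s with
  | nil => simp
  | cons x xs ih => simp only [List.foldl]; rw [ih, ih ("" ++ x)]; simp [String.append_assoc]

theorem pvJoin_cons (a : String) (xs : List String) :
    String.join (a :: xs) = a ++ String.join xs := by
  show (a :: xs).foldl (fun r t => r ++ t) "" = _
  simp only [List.foldl]; rw [pvFoldl_str]; simp [String.join]

theorem pvJoin_append (xs ys : List String) :
    String.join (xs ++ ys) = String.join xs ++ String.join ys := by
  induction xs with
  | nil => simp [String.join]
  | cons x xs ih => rw [List.cons_append, pvJoin_cons, pvJoin_cons, ih, String.append_assoc]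

-- pvLines of a non-key is empty
theorem lines_none (d : Nat) (l : String) (cm : List (String × List (String × String)))
    (h : pvGet? cm l = none) : pvLines d l cm = [] := by
  cases d with
  | zero => rfl
  | succ d => simp [pvLines, h]

-- A's fueled traversal is the join of pvLines
theorem fuel_eq_lines (d : Nat) (l : String) (cm : List (String × List (String × String))) :
    traverse_fromFuel d l cm = String.join (pvLines d l cm) := by
  induction d generalizing l with
  | zero => simp [traverse_fromFuel, pvLines, String.join]
  | succ d ih =>
    have key : ∀ (fl : String) (ch : List (String × String)) (dcl : String),
        traverseLoopA d fl cm ch dcl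
          = dcl ++ String.join (ch.flatMap (fun jl => dcl_between fl jl.2 :: pvLines d jl.2 cm)) := by
      intro fl ch
      induction ch with
      | nil => intro dcl; simp [traverseLoopA, String.join]
      | cons jl tl ihc =>
        intro dcl
        obtain ⟨j, link⟩ := jl
        by_cases hk : (pvGet? cm link).isSome
        · rw [show traverseLoopA d fl cm ((j, link) :: tl) dcl
              = traverseLoopA d fl cm tl (dcl ++ dcl_between fl link ++ traverse_fromFuel d link cm) by
            simp [traverseLoopA, hk]]
          rw [ihc, ih link]
          simp [List.flatMap_cons, pvJoin_cons, pvJoin_append, String.append_assoc]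
        · rw [show traverseLoopA d fl cm ((j, link) :: tl) dcl
              = traverseLoopA d fl cm tl (dcl ++ dcl_between fl link) by
            simp [traverseLoopA, hk]]
          rw [ihc]
          simp [List.flatMap_cons, pvJoin_cons, String.append_assoc,
            lines_none d link cm (Option.not_isSome_iff_eq_none.mp hk)]
    cases hg : pvGet? cm l with
    | none => simp [traverse_fromFuel, pvLines, hg, String.join]
    | some ch =>
      rw [show traverse_fromFuel (d + 1) l cm = traverseLoopA d l cm ch "" by simp [traverse_fromFuel, hg]]
      rw [key, show pvLines (d + 1) l cm
          = ch.flatMap (fun jl => dcl_between l jl.2 :: pvLines d jl.2 cm) by simp [pvLines, hg]]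
      simp

theorem pvGet?_eq_lookup (cm : List (String × List (String × String))) (k : String) :
    pvGet? cm k = cm.lookup k := by
  induction cm with
  | nil => rfl
  | cons p rest ih =>
    obtain ⟨k', v⟩ := p
    by_cases h : k' = k
    · simp [pvGet?, List.lookup, h]
    · have : (k == k') = false := by simp [Ne.symm h]
      simp [pvGet?, List.lookup, h, this, ih]

theorem pvGet?_isSome_of_mem (cm : List (String × List (String × String))) (k : String)
    (h : k ∈ cm.map Prod.fst) : (pvGet? cm k).isSome = true := by
  induction cm with
  | nil => simp at h
  | cons p rest ih =>
    by_cases hk : p.1 = k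
    · obtain ⟨k', v⟩ := p
      subst hk
      simp [pvGet?]
    · obtain ⟨k', v⟩ := p
      simp only [List.map_cons, List.mem_cons] at h
      have hb : (k' == k) = false := by simp [hk]
      simpa [pvGet?, hb] using ih (h.resolve_left (fun e => hk e.symm))

theorem noCycle_done (d : Nat) (cm : List (String × List (String × String))) (path : List String) (l : String)
    (h : pvNoCycle d cm path l = true) : pvDone d l cm = true := by
  induction d generalizing path l with
  | zero => simp [pvNoCycle] at h
  | succ d ih =>
    cases hg : pvGet? cm l with
    | none => simp [pvDone, hg]
    | some ch =>
      have hg' : cm.lookup l = some ch := by rw [← pvGet?_eq_lookup, hg]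
      simp only [pvNoCycle, hg', Bool.and_eq_true, List.all_eq_true] at h
      simp only [pvDone, hg, List.all_eq_true]
      exact fun jl hm => ih (l :: path) jl.2 (h.2 jl hm)

-- the running sum in pvCost's foldl splits off its accumulator
theorem pvFoldl_cost (d : Nat) (cm : List (String × List (String × String)))
    (xs : List (String × String)) (a : Nat) :
    xs.foldl (fun a jl => a + 1 + pvCost d jl.2 cm) a
      = a + xs.foldl (fun a jl => a + 1 + pvCost d jl.2 cm) 0 := by
  induction xs generalizing a with
  | nil => simp
  | cons x xs ihx =>
    simp only [List.foldl]
    rw [ihx, ihx (0 + 1 + pvCost d x.2 cm)]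
    omega

-- one stack item, fully expanded: popping (parent, link) emits its line and the whole subtree of link
theorem stack_expand (d : Nat) (cm : List (String × List (String × String))) :
    ∀ (parent link : String) (rest : List (String × String)) (acc : List String) (f : Nat),
    pvDone d link cm = true →
    traverseStack (1 + pvCost d link cm + f) cm ((parent, link) :: rest) acc
      = traverseStack f cm rest (acc ++ dcl_between parent link :: pvLines d link cm) := by
  induction d with
  | zero => intro parent link rest acc f h; simp [pvDone] at h
  | succ d ih =>
    intro parent link rest acc f h
    cases hg : pvGet? cm link with
    | none =>
      rw [show 1 + pvCost (d + 1) link cm + f = f + 1 by simp [pvCost, hg]; omega]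
      rw [show traverseStack (f + 1) cm ((parent, link) :: rest) acc
          = traverseStack f cm rest (acc ++ [dcl_between parent link]) by simp [traverseStack, hg]]
      rw [show pvLines (d + 1) link cm = [] by simp [pvLines, hg]]
    | some ch =>
      simp only [pvDone, hg, List.all_eq_true] at h
      have key : ∀ (ch2 : List (String × String)) (rest : List (String × String))
          (acc : List String) (f : Nat), (∀ jl ∈ ch2, pvDone d jl.2 cm = true) →
          traverseStack (ch2.foldl (fun a jl => a + 1 + pvCost d jl.2 cm) 0 + f) cm
              (ch2.map (fun jl => (link, jl.2)) ++ rest) acc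
            = traverseStack f cm rest
                (acc ++ ch2.flatMap (fun jl => dcl_between link jl.2 :: pvLines d jl.2 cm)) := by
        intro ch2
        induction ch2 with
        | nil => intro rest acc f h2; simp
        | cons jl tl ihc =>
          intro rest acc f h2
          have e : (jl :: tl).foldl (fun a jl => a + 1 + pvCost d jl.2 cm) 0 + f
              = 1 + pvCost d jl.2 cm
                + (tl.foldl (fun a jl => a + 1 + pvCost d jl.2 cm) 0 + f) := by
            simp only [List.foldl]
            rw [pvFoldl_cost]
            omega
          rw [e]
          simp only [List.map_cons, List.cons_append]
          rw [ih link jl.2 (tl.map (fun jl => (link, jl.2)) ++ rest) acc _ (h2 jl (by simp))]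
          rw [ihc rest _ f (fun x hx => h2 x (List.mem_cons_of_mem jl hx))]
          simp [List.append_assoc]
      have e : 1 + pvCost (d + 1) link cm + f
          = 1 + (ch.foldl (fun a jl => a + 1 + pvCost d jl.2 cm) 0 + f) := by
        simp [pvCost, hg]; omega
      rw [e, Nat.add_comm 1]
      rw [show traverseStack (ch.foldl (fun a jl => a + 1 + pvCost d jl.2 cm) 0 + f + 1) cm
            ((parent, link) :: rest) acc
          = traverseStack (ch.foldl (fun a jl => a + 1 + pvCost d jl.2 cm) 0 + f) cm
              (ch.map (fun jl => (link, jl.2)) ++ rest) (acc ++ [dcl_between parent link]) by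
        simp [traverseStack, hg]]
      rw [key ch rest (acc ++ [dcl_between parent link]) f h]
      rw [show pvLines (d + 1) link cm
          = ch.flatMap (fun jl => dcl_between link jl.2 :: pvLines d jl.2 cm) by simp [pvLines, hg]]
      simp

-- a whole block of pushed children, fully expanded
theorem stack_expand_list (d : Nat) (cm : List (String × List (String × String))) (l : String)
    (ch : List (String × String)) (rest : List (String × String)) (acc : List String) (f : Nat)
    (h : ∀ jl ∈ ch, pvDone d jl.2 cm = true) :
    traverseStack (ch.foldl (fun a jl => a + 1 + pvCost d jl.2 cm) 0 + f) cm
        (ch.map (fun jl => (l, jl.2)) ++ rest) acc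
      = traverseStack f cm rest (acc ++ ch.flatMap (fun jl => dcl_between l jl.2 :: pvLines d jl.2 cm)) := by
  induction ch generalizing rest acc f with
  | nil => simp
  | cons jl tl ihc =>
    have e : (jl :: tl).foldl (fun a jl => a + 1 + pvCost d jl.2 cm) 0 + f
        = 1 + pvCost d jl.2 cm + (tl.foldl (fun a jl => a + 1 + pvCost d jl.2 cm) 0 + f) := by
      simp only [List.foldl]
      rw [pvFoldl_cost]
      omega
    rw [e]
    simp only [List.map_cons, List.cons_append]
    rw [stack_expand d cm l jl.2 (tl.map (fun jl => (l, jl.2)) ++ rest) acc _ (h jl (by simp))]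
    rw [ihc _ _ _ (fun x hx => h x (List.mem_cons_of_mem jl hx))]
    simp [List.append_assoc]

-- ===== VERDICT (by name: the statement is the Claim_ definition above) =====
theorem traverse_from_spec : Claim_equal_traverse_from := by
  intro from_link cm level _ hpre
  obtain ⟨hsome, hnc⟩ := hpre
  unfold Spec_traverse_from
  obtain ⟨ch0, hg⟩ := Option.isSome_iff_exists.mp (pvGet?_isSome_of_mem cm from_link hsome)
  have hdone : pvDone (cm.length + 2) from_link cm = true := noCycle_done _ cm [] from_link hnc
  have hch : ∀ jl ∈ ch0, pvDone (cm.length + 1) jl.2 cm = true := by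
    rw [show cm.length + 2 = (cm.length + 1) + 1 from rfl] at hdone
    simp only [pvDone, hg, List.all_eq_true] at hdone
    exact hdone
  have hA : traverse_from from_link cm level = String.join (pvLines (cm.length + 2) from_link cm) := by
    unfold traverse_from; exact fuel_eq_lines _ _ _
  have hlines : pvLines (cm.length + 2) from_link cm
      = ch0.flatMap (fun jl => dcl_between from_link jl.2 :: pvLines (cm.length + 1) jl.2 cm) := by
    rw [show cm.length + 2 = (cm.length + 1) + 1 from rfl]
    simp [pvLines, hg]
  have hcost : pvCost (cm.length + 2) from_link cm
      = ch0.foldl (fun a jl => a + 1 + pvCost (cm.length + 1) jl.2 cm) 0 + 0 := by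
    rw [show cm.length + 2 = (cm.length + 1) + 1 from rfl]
    simp [pvCost, hg]
  have hB : traverse_from_alt from_link cm level
      = String.join (ch0.flatMap (fun jl => dcl_between from_link jl.2 :: pvLines (cm.length + 1) jl.2 cm)) := by
    simp only [traverse_from_alt, hg]
    rw [show (ch0.map fun jl => (from_link, jl.2)) = (ch0.map fun jl => (from_link, jl.2)) ++ [] by simp]
    rw [hcost, stack_expand_list (cm.length + 1) cm from_link ch0 [] [] 0 hch]
    simp [traverseStack]
  rw [hA, hB, hlines]
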